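-- pv_equiv track=rewrite | github.com/yas-sim/floppy_disk_shield_2d | trim.py | distbuf_to_rawstr
-- ===== SOURCE A (Python) =====
-- def distbuf_to_rawstr(distbuf:list):
--     encode_base = ord(' ');
--     max_length  = ord('z') - encode_base;
--     extend_char = ord('{');
--     count = 0
--     raw_buf = []
--     tmp_buf = '~'
--     for dist in distbuf:
--         while dist > max_length:
--             dist -= max_length
--             tmp_buf += chr(extend_char)
--             count += 1
--             if count % 100 == 99:
--                 raw_buf.append(tmp_buf)
--                 tmp_buf = '~'
--         tmp_buf += chr(dist + encode_base)
--         count += 1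
--         if count % 100 == 99:
--             raw_buf.append(tmp_buf)
--             tmp_buf = '~'
--     if len(tmp_buf) > 1:
--         raw_buf.append(tmp_buf)
--     return raw_buf
-- ===== SOURCE B (Python) =====
-- def distbuf_to_rawstr(distbuf: list):
--     # First pass: build the flat encoded character stream, no counter, no flushing.
--     parts = []
--     for dist in distbuf:
--         if dist > 90:
--             k = (dist - 1) // 90          # number of '{' extension chars
--             parts.append('{' * k)
--             dist -= 90 * k
--         parts.append(chr(dist + 32))
--     s = ''.join(parts)
--     # Second pass: slice into blocks of 99 chars (first) then 100, each prefixed '~'.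
--     out = []
--     i, size = 0, 99
--     while i < len(s):
--         out.append('~' + s[i:i + size])
--         i += size
--         size = 100
--     return out
-- ===== Notes on version B (the rewrite author's own statement) =====
-- stated objective: simpler
-- what changed: A interleaves encoding with a running character counter and flushes mid-stream whenever count % 100 == 99; B first builds the whole encoded character stream (with a closed-form '{'-run count via (dist-1)//90 instead of A's repeated-subtraction while loop) and then slices it into blocks of 99 then 100 characters.
import Mathlib
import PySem

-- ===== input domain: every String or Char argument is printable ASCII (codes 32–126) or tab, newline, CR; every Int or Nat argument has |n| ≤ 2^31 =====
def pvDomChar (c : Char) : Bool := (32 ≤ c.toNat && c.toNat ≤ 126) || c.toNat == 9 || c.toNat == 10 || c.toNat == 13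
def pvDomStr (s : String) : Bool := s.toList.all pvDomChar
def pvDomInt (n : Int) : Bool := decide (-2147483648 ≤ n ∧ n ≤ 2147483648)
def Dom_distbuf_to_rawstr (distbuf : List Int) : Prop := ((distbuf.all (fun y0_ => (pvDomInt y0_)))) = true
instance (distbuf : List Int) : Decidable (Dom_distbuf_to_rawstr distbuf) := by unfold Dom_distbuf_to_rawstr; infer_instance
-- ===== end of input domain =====

-- B replaces A's single counter-and-flush loop by two passes: build the flat encoded char
-- stream (closed-form '{'-run instead of the subtracting while), then slice it into 99/100-char
-- blocks; objective: simpler. Constants: encode_base = 32, max_length = 90, extend_char = '{'.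

-- ===== PORT A =====
-- the repeated Python block "tmp_buf += c; count += 1; if count % 100 == 99: flush"
def emitA (st : Int × List String × List Char) (c : Char) : Int × List String × List Char :=
  let tmp := st.2.2 ++ [c]
  let count := st.1 + 1
  if PySem.Int.mod count 100 == 99 then (count, st.2.1 ++ [String.ofList tmp], ['~'])
  else (count, st.2.1, tmp)

-- the body of "for dist in distbuf": the while loop, then the final character
def stepA (st : Int × List String × List Char) (dist : Int) : Int × List String × List Char :=
  if h : dist > 90 then stepA (emitA st '{') (dist - 90)
  else emitA st (Char.ofNat (dist + 32).toNat)
termination_by dist.toNat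
decreasing_by omega

def distbuf_to_rawstr (distbuf : List Int) : List String :=
  let st := distbuf.foldl stepA (0, ([], ['~']))
  if st.2.2.length > 1 then st.2.1 ++ [String.ofList st.2.2] else st.2.1

-- ===== PORT B =====
-- first pass of Source B: parts.append('{'*k and the final char) — strings kept as char lists
def altStep (parts : List (List Char)) (dist : Int) : List (List Char) :=
  if dist > 90 then
    let k := PySem.Int.floordiv (dist - 1) 90
    (parts ++ [List.replicate k.toNat '{']) ++ [[Char.ofNat (dist - 90 * k + 32).toNat]]
  else parts ++ [[Char.ofNat (dist + 32).toNat]]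

-- second pass of Source B: the slicing while loop; `size` holds the block size MINUS ONE (98 then 99)
def altChunks : List Char → Nat → List String
  | [], _ => []
  | c :: cs, size => String.ofList ('~' :: c :: cs.take size) :: altChunks (cs.drop size) 99
termination_by l _ => l.length
decreasing_by simp [List.length_drop]

def distbuf_to_rawstr_alt (distbuf : List Int) : List String :=
  altChunks ((distbuf.foldl altStep []).flatten) 98

-- ===== PRECONDITION & SPEC =====
-- Pre_ excludes exactly the inputs where Python A raises: chr(dist + 32) is a ValueError
-- when some dist < -32 (after the while loop dist never exceeds 90, so only the lower bound matters).
def Pre_distbuf_to_rawstr (distbuf : List Int) : Prop := ∀ d ∈ distbuf, -32 ≤ d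
instance (distbuf : List Int) : Decidable (Pre_distbuf_to_rawstr distbuf) := by
  unfold Pre_distbuf_to_rawstr; infer_instance

def pvWitness_distbuf_to_rawstr : List Int := [5, 1000, 0]

def Spec_distbuf_to_rawstr (distbuf : List Int) (out : List String) : Prop := out = distbuf_to_rawstr_alt distbuf
instance (distbuf : List Int) (out : List String) : Decidable (Spec_distbuf_to_rawstr distbuf out) := by unfold Spec_distbuf_to_rawstr; infer_instance

-- ===== CLAIM (what is proved, stated in full; the proofs are below) =====
def Claim_equal_distbuf_to_rawstr : Prop := ∀ (distbuf : List Int), Dom_distbuf_to_rawstr distbuf → Pre_distbuf_to_rawstr distbuf → Spec_distbuf_to_rawstr distbuf (distbuf_to_rawstr distbuf)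

-- ===== LEMMAS AND PROOFS =====

-- the flat character stream one dist contributes (A's while loop read as a producer)
def charsOf (dist : Int) : List Char :=
  if h : dist > 90 then '{' :: charsOf (dist - 90)
  else [Char.ofNat (dist + 32).toNat]
termination_by dist.toNat
decreasing_by omega

-- A's final "if len(tmp_buf) > 1" flush
def finishA (st : Int × List String × List Char) : List String :=
  if st.2.2.length > 1 then st.2.1 ++ [String.ofList st.2.2] else st.2.1

-- chars remaining before A's next flush, as a function of the counter
def capOf (count : Int) : Nat :=
  if count % 100 = 99 then 100 else (99 - count % 100).toNat

lemma charsOf_closed (dist : Int) (h : dist > 90) :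
    charsOf dist =
      List.replicate (PySem.Int.floordiv (dist - 1) 90).toNat '{' ++
        [Char.ofNat (dist - 90 * PySem.Int.floordiv (dist - 1) 90 + 32).toNat] := by
  rw [PySem.Int.floordiv_eq_ediv_of_pos (by norm_num)]
  induction dist using charsOf.induct with
  | case1 dist h1 ih =>
    rw [charsOf]
    simp only [h1, dif_pos]
    by_cases h2 : dist - 90 > 90
    · rw [ih h2]
      have hk : (dist - 1) / 90 = (dist - 90 - 1) / 90 + 1 := by omega
      have hk0 : 0 ≤ (dist - 90 - 1) / 90 := by omega
      rw [hk]
      have ht : ((dist - 90 - 1) / 90 + 1).toNat = ((dist - 90 - 1) / 90).toNat + 1 := by omega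
      have ha : dist - 90 - 90 * ((dist - 90 - 1) / 90) + 32
              = dist - 90 * ((dist - 90 - 1) / 90 + 1) + 32 := by ring
      rw [ht, ha, List.replicate_succ]
      simp
    · rw [charsOf]
      simp only [h2, dite_false]
      have hk : (dist - 1) / 90 = 1 := by omega
      have ha : dist - 90 + 32 = dist - 90 * 1 + 32 := by ring
      rw [hk, ha]
      rfl
  | case2 dist h1 => omega

lemma altStep_flatten (parts : List (List Char)) (dist : Int) :
    (altStep parts dist).flatten = parts.flatten ++ charsOf dist := by
  unfold altStep
  by_cases h : dist > 90
  · simp only [h, if_true, List.flatten_append]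
    rw [charsOf_closed dist h]
    simp
  · simp only [h, if_false, List.flatten_append]
    rw [charsOf]
    simp [h]

lemma foldl_altStep_flatten (l : List Int) (parts : List (List Char)) :
    (l.foldl altStep parts).flatten = parts.flatten ++ l.flatMap charsOf := by
  induction l generalizing parts with
  | nil => simp
  | cons d l ih =>
    rw [List.foldl_cons, ih, altStep_flatten, List.flatMap_cons, List.append_assoc]

lemma stepA_eq_foldl (dist : Int) (st : Int × List String × List Char) :
    stepA st dist = List.foldl emitA st (charsOf dist) := by
  induction st, dist using stepA.induct with
  | case1 st dist h ih =>
    rw [stepA, charsOf]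
    simp only [h, dif_pos, List.foldl_cons]
    exact ih
  | case2 st dist h =>
    rw [stepA, charsOf]
    simp [h]

lemma foldl_stepA_eq (l : List Int) (st : Int × List String × List Char) :
    l.foldl stepA st = List.foldl emitA st (l.flatMap charsOf) := by
  induction l generalizing st with
  | nil => simp
  | cons d l ih =>
    rw [List.foldl_cons, ih, List.flatMap_cons, List.foldl_append, stepA_eq_foldl]

lemma altChunks_flush (tmp cs : List Char) (c : Char) :
    altChunks (tmp ++ c :: cs) tmp.length =
      String.ofList ('~' :: (tmp ++ [c])) :: altChunks cs 99 := by
  cases tmp with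
  | nil => simp [altChunks]
  | cons t ts =>
    show altChunks (t :: (ts ++ c :: cs)) (ts.length + 1) = _
    rw [altChunks]
    have h1 : (ts ++ c :: cs).take (ts.length + 1) = ts ++ [c] := by
      rw [show ts.length + 1 = ts.length + [c].length by simp]
      rw [show ts ++ c :: cs = (ts ++ [c]) ++ cs by simp]
      rw [show ts.length + [c].length = (ts ++ [c]).length by simp]
      exact List.take_left
    have h2 : (ts ++ c :: cs).drop (ts.length + 1) = cs := by
      rw [show ts ++ c :: cs = (ts ++ [c]) ++ cs by simp]
      rw [show ts.length + 1 = (ts ++ [c]).length by simp]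
      exact List.drop_left
    rw [h1, h2]
    simp

lemma key (cs : List Char) (count : Int) (raw : List String) (tmp : List Char)
    (h : 0 ≤ count) :
    finishA (List.foldl emitA (count, raw, '~' :: tmp) cs) =
      raw ++ altChunks (tmp ++ cs) (tmp.length + capOf count - 1) := by
  induction cs generalizing count raw tmp with
  | nil =>
    cases tmp with
    | nil => simp [finishA, altChunks]
    | cons t ts =>
      simp only [List.foldl_nil, finishA, List.append_nil]
      have hlen : ('~' :: t :: ts).length > 1 := by simp
      rw [if_pos hlen]
      show _ = raw ++ altChunks (t :: ts) (ts.length + 1 + capOf count - 1)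
      rw [altChunks]
      have hts : ts.length ≤ ts.length + 1 + capOf count - 1 := by omega
      rw [List.take_of_length_le hts, List.drop_eq_nil_of_le hts]
      simp [altChunks]
  | cons c cs ih =>
    rw [List.foldl_cons]
    have hm : 0 ≤ count % 100 ∧ count % 100 < 100 :=
      ⟨Int.emod_nonneg _ (by norm_num), Int.emod_lt_of_pos _ (by norm_num)⟩
    by_cases hf : (count + 1) % 100 = 99
    · have hemit : emitA (count, raw, '~' :: tmp) c =
          (count + 1, raw ++ [String.ofList ('~' :: (tmp ++ [c]))], ['~']) := by
        simp [emitA, hf]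
      rw [hemit, ih _ _ _ (by omega)]
      have h98 : count % 100 = 98 := by omega
      have hcap : capOf count = 1 := by unfold capOf; rw [if_neg (by omega), h98]; rfl
      have hcap' : capOf (count + 1) = 100 := by unfold capOf; rw [if_pos hf]
      rw [hcap, hcap']
      rw [show tmp.length + 1 - 1 = tmp.length by omega, altChunks_flush]
      simp
    · have hemit : emitA (count, raw, '~' :: tmp) c =
          (count + 1, raw, '~' :: (tmp ++ [c])) := by
        simp [emitA, hf]
      rw [hemit, ih _ _ _ (by omega)]
      have hcap : (tmp ++ [c]).length + capOf (count + 1) - 1 = tmp.length + capOf count - 1 := by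
        simp only [List.length_append, List.length_cons, List.length_nil]
        unfold capOf
        split_ifs <;> omega
      rw [hcap]
      simp

-- ===== VERDICT (by name: the statement is the Claim_ definition above) =====
theorem distbuf_to_rawstr_spec : Claim_equal_distbuf_to_rawstr := by
  intro distbuf _ _
  unfold Spec_distbuf_to_rawstr distbuf_to_rawstr distbuf_to_rawstr_alt
  simp only []
  rw [foldl_stepA_eq, foldl_altStep_flatten]
  have hk := key (distbuf.flatMap charsOf) 0 [] [] (by omega)
  have hc : capOf 0 = 99 := by decide
  rw [hc] at hk
  simpa [finishA] using hk
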